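-- pv_equiv track=rewrite | github.com/stefanhermes-code/Observatory | core/customer_filter.py | filter_signals_by_spec
-- ===== SOURCE A (Python) =====
-- from typing import Any, Dict, List, Tuple
--
-- def filter_signals_by_spec(
--     signals: List[Dict[str, Any]],
--     query_plan_map: Dict[str, Dict[str, str]],
--     spec: Dict[str, Any],
-- ) -> List[Dict[str, Any]]:
--     """
--     Apply strict customer specification filter to master signals using query intent map.
--     Each signal has query_id; metadata (region, configurator_category, value_chain_link)
--     is looked up from query_plan_map. Unset metadata does NOT pass when the spec
--     constrains that dimension (same rule as filter_candidates_by_spec).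
--     """
--     regions = spec.get("regions") or []
--     categories = spec.get("categories") or []
--     # Ultra-relaxed: value_chain_link is optional and must not influence filtering outcome.
--     value_chain_links = spec.get("value_chain_links") or []
--
--     if not regions and not categories and not value_chain_links:
--         return list(signals)
--
--     filtered: List[Dict[str, Any]] = []
--     for s in signals:
--         qid = (s.get("query_id") or "").strip()
--         meta = query_plan_map.get(qid) or {}
--         region = (meta.get("region") or "").strip()
--         config_cat = (meta.get("configurator_category") or "").strip()
--         vcl = (meta.get("value_chain_link") or "").strip()
--
--         ok_region = (not regions) or (region in regions)
--         ok_category = (not categories) or (config_cat in categories)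
--         # Ignore vcl completely for Run 9 philosophy.
--         ok_vcl = True
--
--         # Ultra-relaxed: missing category should not be rejected.
--         if ok_region and (ok_category or not config_cat) and ok_vcl:
--             filtered.append(s)
--     return filtered
-- ===== SOURCE B (Python) =====
-- from typing import Any, Dict, List
--
-- def filter_signals_by_spec(
--     signals: List[Dict[str, Any]],
--     query_plan_map: Dict[str, Dict[str, str]],
--     spec: Dict[str, Any],
-- ) -> List[Dict[str, Any]]:
--     regions = spec.get("regions") or []
--     categories = spec.get("categories") or []
--     value_chain_links = spec.get("value_chain_links") or []
--
--     if not regions and not categories and not value_chain_links: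
--         return list(signals)
--
--     def verdict(meta: Dict[str, str]) -> bool:
--         region = (meta.get("region") or "").strip()
--         config_cat = (meta.get("configurator_category") or "").strip()
--         return ((not regions or region in regions)
--                 and (not categories or config_cat in categories or not config_cat))
--
--     passing = {qid for qid, meta in query_plan_map.items() if verdict(meta)}
--     empty_ok = verdict({})
--
--     out: List[Dict[str, Any]] = []
--     for s in signals:
--         qid = (s.get("query_id") or "").strip()
--         if qid in passing or (qid not in query_plan_map and empty_ok):
--             out.append(s)
--     return out
-- ===== Notes on version B (the rewrite author's own statement) =====
-- stated objective: alternative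
-- what changed: Instead of looking up and re-evaluating the region/category metadata verdict for every signal, B precomputes in one pass over query_plan_map the set of passing query ids (plus the verdict for empty metadata, covering absent ids) and then filters signals by a set-membership test.
import Mathlib
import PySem

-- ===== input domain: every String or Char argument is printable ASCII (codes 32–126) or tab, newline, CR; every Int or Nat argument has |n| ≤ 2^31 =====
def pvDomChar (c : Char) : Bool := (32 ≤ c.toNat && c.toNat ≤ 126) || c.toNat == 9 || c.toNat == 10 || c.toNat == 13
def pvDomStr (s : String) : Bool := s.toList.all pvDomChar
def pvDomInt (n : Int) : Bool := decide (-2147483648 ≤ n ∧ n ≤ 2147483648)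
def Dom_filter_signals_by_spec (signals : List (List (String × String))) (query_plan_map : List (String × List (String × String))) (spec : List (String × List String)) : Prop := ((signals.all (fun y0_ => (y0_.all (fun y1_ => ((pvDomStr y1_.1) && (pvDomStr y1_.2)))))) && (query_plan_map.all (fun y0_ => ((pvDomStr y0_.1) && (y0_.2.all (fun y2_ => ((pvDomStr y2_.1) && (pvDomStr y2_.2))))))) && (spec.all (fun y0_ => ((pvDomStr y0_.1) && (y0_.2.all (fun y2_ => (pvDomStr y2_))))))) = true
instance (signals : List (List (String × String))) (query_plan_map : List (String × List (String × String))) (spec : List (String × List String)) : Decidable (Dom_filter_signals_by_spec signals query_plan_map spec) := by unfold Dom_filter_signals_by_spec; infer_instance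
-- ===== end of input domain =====

-- B precomputes the per-query-id verdict once over query_plan_map (plus the empty-metadata
-- verdict for absent ids) and then filters signals by set membership, instead of re-deriving
-- the metadata verdict per signal; return-value equivalence, no mutation involved.

-- ===== PORT A =====
-- dict.get on an association list (first match), shared by both ports (both Pythons call dict.get)
def pvDictGet? {α : Type} (d : List (String × α)) (k : String) : Option α :=
  match d with
  | [] => none
  | (k', v) :: t => if k' == k then some v else pvDictGet? t k

def filter_signals_by_spec (signals : List (List (String × String))) (query_plan_map : List (String × List (String × String))) (spec : List (String × List String)) : List (List (String × String)) :=
  let regions := (pvDictGet? spec "regions").getD []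
  let categories := (pvDictGet? spec "categories").getD []
  let value_chain_links := (pvDictGet? spec "value_chain_links").getD []
  if regions.isEmpty && categories.isEmpty && value_chain_links.isEmpty then signals
  else
    signals.foldl (fun filtered s =>
      let qid := PySem.Str.strip ((pvDictGet? s "query_id").getD "")
      let meta_ := (pvDictGet? query_plan_map qid).getD []
      let region := PySem.Str.strip ((pvDictGet? meta_ "region").getD "")
      let config_cat := PySem.Str.strip ((pvDictGet? meta_ "configurator_category").getD "")
      let _vcl := PySem.Str.strip ((pvDictGet? meta_ "value_chain_link").getD "")  -- computed and ignored, as in A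
      let ok_region := regions.isEmpty || regions.contains region
      let ok_category := categories.isEmpty || categories.contains config_cat
      let ok_vcl := true
      if ok_region && (ok_category || config_cat == "") && ok_vcl then filtered ++ [s] else filtered) []

-- ===== PORT B =====
def pvVerdict (regions categories : List String) (meta_ : List (String × String)) : Bool :=
  let region := PySem.Str.strip ((pvDictGet? meta_ "region").getD "")
  let config_cat := PySem.Str.strip ((pvDictGet? meta_ "configurator_category").getD "")
  (regions.isEmpty || regions.contains region) &&
  (categories.isEmpty || categories.contains config_cat || config_cat == "")

def filter_signals_by_spec_alt (signals : List (List (String × String))) (query_plan_map : List (String × List (String × String))) (spec : List (String × List String)) : List (List (String × String)) :=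
  let regions := (pvDictGet? spec "regions").getD []
  let categories := (pvDictGet? spec "categories").getD []
  let value_chain_links := (pvDictGet? spec "value_chain_links").getD []
  if regions.isEmpty && categories.isEmpty && value_chain_links.isEmpty then signals
  else
    let passing : PySem.Set String :=
      PySem.Set.ofList ((query_plan_map.filter (fun kv => pvVerdict regions categories kv.2)).map Prod.fst)
    let empty_ok := pvVerdict regions categories []
    signals.filter (fun s =>
      let qid := PySem.Str.strip ((pvDictGet? s "query_id").getD "")
      PySem.Set.contains passing qid || (!(query_plan_map.map Prod.fst).contains qid && empty_ok))

-- ===== PRECONDITION & SPEC =====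
-- Pre_ excludes only association lists giving query_plan_map duplicate keys: such lists do not
-- represent any Python dict (a dict's keys are unique), so A is never run on them.
def Pre_filter_signals_by_spec (signals : List (List (String × String))) (query_plan_map : List (String × List (String × String))) (spec : List (String × List String)) : Prop :=
  (query_plan_map.map Prod.fst).Nodup
instance (signals : List (List (String × String))) (query_plan_map : List (String × List (String × String))) (spec : List (String × List String)) : Decidable (Pre_filter_signals_by_spec signals query_plan_map spec) := by unfold Pre_filter_signals_by_spec; infer_instance

def pvWitness_filter_signals_by_spec : (List (List (String × String))) × (List (String × List (String × String))) × (List (String × List String)) :=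
  ([[("query_id", "q1")], [("query_id", "q2")]],
   [("q1", [("region", "EU")])],
   [("regions", ["EU"])])

def Spec_filter_signals_by_spec (signals : List (List (String × String))) (query_plan_map : List (String × List (String × String))) (spec : List (String × List String)) (out : List (List (String × String))) : Prop := out = filter_signals_by_spec_alt signals query_plan_map spec
instance (signals : List (List (String × String))) (query_plan_map : List (String × List (String × String))) (spec : List (String × List String)) (out : List (List (String × String))) : Decidable (Spec_filter_signals_by_spec signals query_plan_map spec out) := by unfold Spec_filter_signals_by_spec; infer_instance

-- ===== CLAIM (what is proved, stated in full; the proofs are below) =====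
def Claim_equal_filter_signals_by_spec : Prop := ∀ (signals : List (List (String × String))) (query_plan_map : List (String × List (String × String))) (spec : List (String × List String)), Dom_filter_signals_by_spec signals query_plan_map spec → Pre_filter_signals_by_spec signals query_plan_map spec → Spec_filter_signals_by_spec signals query_plan_map spec (filter_signals_by_spec signals query_plan_map spec)

-- ===== LEMMAS AND PROOFS =====

-- B's membership test (passing set, or absent key + empty-metadata verdict) equals
-- A's verdict on the looked-up metadata, given unique keys.
lemma pv_pass_eq (V : List (String × String) → Bool) :
    ∀ (qpm : List (String × List (String × String))), (qpm.map Prod.fst).Nodup → ∀ (q : String),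
      (PySem.Set.contains (PySem.Set.ofList ((qpm.filter (fun kv => V kv.2)).map Prod.fst)) q
        || (!(qpm.map Prod.fst).contains q && V []))
      = V ((pvDictGet? qpm q).getD []) := by
  intro qpm
  induction qpm with
  | nil => intro _ q; simp [pvDictGet?]
  | cons kv t ih =>
    intro hnd q
    obtain ⟨k, v⟩ := kv
    simp only [List.map_cons, List.nodup_cons] at hnd
    have ht := ih hnd.2 q
    by_cases hk : k = q
    · subst hk
      have hkt : k ∉ List.map Prod.fst (List.filter (fun kv => V kv.2) t) := by
        intro h
        obtain ⟨p, hp, hfst⟩ := List.mem_map.mp h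
        exact hnd.1 (hfst ▸ List.mem_map_of_mem (List.mem_of_mem_filter hp))
      rw [show pvDictGet? ((k, v) :: t) k = some v by simp [pvDictGet?]]
      cases hv : V v <;>
        simp [PySem.Set.mem_ofList, List.mem_cons, hv, hkt, hnd.1]
    · have hne : ¬ q = k := fun h => hk h.symm
      rw [show pvDictGet? ((k, v) :: t) q = pvDictGet? t q by simp [pvDictGet?, hk]]
      rw [← ht]
      have hb : (q == k) = false := by simp [hne]
      cases hv : V v
      · simp [hb, hv]
      · simp only [List.filter_cons, hv, if_true, List.map_cons, PySem.Set.ofList_cons,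
          List.contains_cons, hb, Bool.false_or]
        have hdq : (q ∈ (PySem.Set.ofList (List.map Prod.fst (List.filter (fun kv => V kv.2) t))).discard k)
            ↔ q ∈ PySem.Set.ofList (List.map Prod.fst (List.filter (fun kv => V kv.2) t)) := by
          rw [PySem.Set.mem_discard]; simp [hne]
        have hd2 : decide (q ∈ (PySem.Set.ofList (List.map Prod.fst (List.filter (fun kv => V kv.2) t))).discard k)
            = decide (q ∈ PySem.Set.ofList (List.map Prod.fst (List.filter (fun kv => V kv.2) t))) := by
          simp only [decide_eq_decide]; exact hdq
        simp [hb, hd2]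

-- ===== VERDICT (by name: the statement is the Claim_ definition above) =====
theorem filter_signals_by_spec_spec : Claim_equal_filter_signals_by_spec := by
  intro signals qpm spec _ hpre
  unfold Spec_filter_signals_by_spec filter_signals_by_spec filter_signals_by_spec_alt
  dsimp only
  split
  · rfl
  · rw [PySem.List.foldl_append_if_eq_filter]
    rw [List.nil_append]
    apply List.filter_congr
    intro s _
    have h := pv_pass_eq
      (pvVerdict ((pvDictGet? spec "regions").getD []) ((pvDictGet? spec "categories").getD []))
      qpm hpre (PySem.Str.strip ((pvDictGet? s "query_id").getD ""))
    simp only [] at h ⊢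
    rw [h]
    unfold pvVerdict
    simp only [Bool.and_true, Bool.or_assoc]
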